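-- pv_equiv track=rewrite | github.com/sh-sergey1226/test_task | main.py | steper
-- ===== SOURCE A (Python) =====
-- def move(point, course, lab):
--     x, y = point[0], point[1]
--     if course == 'r' and (point[0]+1, point[1]) in lab:
--         x+=1
--     if course == 'l' and (point[0]-1, point[1]) in lab:
--         x-=1
--     if course == 'u' and (point[0], point[1]+1) in lab:
--         y+=1
--     if course == 'd' and (point[0], point[1]-1) in lab:
--         y-=1
--     new_point = [x, y]
--     return new_point
--
-- def steper(lab, z_point, way):
--     if len(way) == 1:
--         new_position = move(z_point,way[0], lab)
--         return new_position
--     else: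
--         step = way.pop(0)
--         new_position = move(z_point, step, lab)
--         return steper(lab, new_position, way)
-- ===== SOURCE B (Python) =====
-- _DELTAS = {'r': (1, 0), 'l': (-1, 0), 'u': (0, 1), 'd': (0, -1)}
--
-- def steper(lab, z_point, way):
--     x, y = z_point[0], z_point[1]
--     for step in way:
--         dx, dy = _DELTAS.get(step, (0, 0))
--         if (x + dx, y + dy) in lab:
--             x, y = x + dx, y + dy
--     return [x, y]
-- ===== Notes on version B (the rewrite author's own statement) =====
-- stated objective: idiomatic
-- what changed: Replaced the recursion with front-pop mutation and the four-branch move helper by a single iterative for-loop over the step list driven by a direction->delta table, accumulating the coordinates in two variables.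
import Mathlib
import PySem

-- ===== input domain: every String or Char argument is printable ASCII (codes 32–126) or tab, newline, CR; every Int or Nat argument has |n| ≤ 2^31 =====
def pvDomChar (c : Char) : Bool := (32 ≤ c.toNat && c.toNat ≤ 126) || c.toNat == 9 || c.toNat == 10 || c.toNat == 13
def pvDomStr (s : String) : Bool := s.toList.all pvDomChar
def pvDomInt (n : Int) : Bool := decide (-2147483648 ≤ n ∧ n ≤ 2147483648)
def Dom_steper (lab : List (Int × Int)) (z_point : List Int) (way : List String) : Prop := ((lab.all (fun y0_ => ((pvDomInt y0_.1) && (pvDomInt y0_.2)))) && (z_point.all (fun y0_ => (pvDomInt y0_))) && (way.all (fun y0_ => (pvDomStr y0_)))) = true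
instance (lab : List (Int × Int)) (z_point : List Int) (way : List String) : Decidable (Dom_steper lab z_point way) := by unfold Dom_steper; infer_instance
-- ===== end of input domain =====

-- B replaces A's pop/recurse scheme (which also mutates `way` in place; equivalence here is
-- about the RETURN value only) by one idiomatic fold over the steps with a direction→delta table.

-- ===== PORT A =====
-- A-side helper: Python `move` (reads point[0], point[1]; defaults only matter outside Pre_)
def moveA (point : List Int) (course : String) (lab : List (Int × Int)) : List Int :=
  let x0 := (PySem.List.pyGet? point 0).getD 0
  let y0 := (PySem.List.pyGet? point 1).getD 0
  let x1 := if course = "r" ∧ (x0 + 1, y0) ∈ lab then x0 + 1 else x0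
  let x2 := if course = "l" ∧ (x0 - 1, y0) ∈ lab then x1 - 1 else x1
  let y1 := if course = "u" ∧ (x0, y0 + 1) ∈ lab then y0 + 1 else y0
  let y2 := if course = "d" ∧ (x0, y0 - 1) ∈ lab then y1 - 1 else y1
  [x2, y2]

def steper (lab : List (Int × Int)) (z_point : List Int) (way : List String) : List Int :=
  match way with
  | [s] => moveA z_point s lab
  | [] => []              -- Python raises IndexError here; excluded by Pre_steper
  | s :: rest => steper lab (moveA z_point s lab) rest

-- ===== PORT B =====
-- B-side helper: the _DELTAS table lookup (dict.get with default (0,0))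
def deltasB : PySem.Dict String (Int × Int) :=
  PySem.Dict.mk [("r", (1, 0)), ("l", (-1, 0)), ("u", (0, 1)), ("d", (0, -1))]

def stepB (lab : List (Int × Int)) (xy : Int × Int) (step : String) : Int × Int :=
  let d := PySem.Dict.getD deltasB step (0, 0)
  if (xy.1 + d.1, xy.2 + d.2) ∈ lab then (xy.1 + d.1, xy.2 + d.2) else xy

def steper_alt (lab : List (Int × Int)) (z_point : List Int) (way : List String) : List Int :=
  let x0 := (PySem.List.pyGet? z_point 0).getD 0
  let y0 := (PySem.List.pyGet? z_point 1).getD 0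
  let p := way.foldl (stepB lab) (x0, y0)
  [p.1, p.2]

-- ===== PRECONDITION & SPEC =====
-- Pre_: Python A raises IndexError on an empty way (way.pop(0)) and on a point with fewer
-- than two coordinates (point[1] in move); exactly those inputs are excluded.
def Pre_steper (lab : List (Int × Int)) (z_point : List Int) (way : List String) : Prop :=
  way ≠ [] ∧ 2 ≤ z_point.length
instance (lab : List (Int × Int)) (z_point : List Int) (way : List String) : Decidable (Pre_steper lab z_point way) := by unfold Pre_steper; infer_instance

def pvWitness_steper : (List (Int × Int)) × List Int × List String :=
  ([(1, 0), (1, 1)], [0, 0], ["r", "u"])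

def Spec_steper (lab : List (Int × Int)) (z_point : List Int) (way : List String) (out : List Int) : Prop := out = steper_alt lab z_point way
instance (lab : List (Int × Int)) (z_point : List Int) (way : List String) (out : List Int) : Decidable (Spec_steper lab z_point way out) := by unfold Spec_steper; infer_instance

-- ===== CLAIM (what is proved, stated in full; the proofs are below) =====
def Claim_equal_steper : Prop := ∀ (lab : List (Int × Int)) (z_point : List Int) (way : List String), Dom_steper lab z_point way → Pre_steper lab z_point way → Spec_steper lab z_point way (steper lab z_point way)
-- ===== LEMMAS AND PROOFS =====

-- A's four-if move on any point equals one B step on the (defaulted) first two coordinates.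
lemma moveA_eq_stepB (point : List Int) (course : String) (lab : List (Int × Int)) :
    moveA point course lab =
      (fun p : Int × Int => [p.1, p.2])
        (stepB lab ((PySem.List.pyGet? point 0).getD 0, (PySem.List.pyGet? point 1).getD 0) course) := by
  simp only [moveA, stepB, deltasB, PySem.Dict.getD, PySem.Dict.get?, List.find?]
  by_cases hr : course = "r"
  · subst hr; norm_num; split_ifs <;> simp_all
  by_cases hl : course = "l"
  · subst hl
    norm_num
    simp only [sub_eq_add_neg]
    split_ifs <;> simp_all
  by_cases hu : course = "u"
  · subst hu; norm_num; split_ifs <;> simp_all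
  by_cases hd : course = "d"
  · subst hd
    norm_num
    simp only [sub_eq_add_neg]
    split_ifs <;> simp_all
  have h1 : ("r" == course) = false := beq_eq_false_iff_ne.mpr (fun h => hr h.symm)
  have h2 : ("l" == course) = false := beq_eq_false_iff_ne.mpr (fun h => hl h.symm)
  have h3 : ("u" == course) = false := beq_eq_false_iff_ne.mpr (fun h => hu h.symm)
  have h4 : ("d" == course) = false := beq_eq_false_iff_ne.mpr (fun h => hd h.symm)
  simp only [h1, h2, h3, h4]
  simp [hr, hl, hu, hd]

-- The recursion over a nonempty way from a literal two-element point is B's fold.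
lemma steper_pair (lab : List (Int × Int)) :
    ∀ (way : List String) (x y : Int), way ≠ [] →
      steper lab [x, y] way =
        (fun p : Int × Int => [p.1, p.2]) (way.foldl (stepB lab) (x, y)) := by
  intro way
  induction way with
  | nil => intro x y h; exact absurd rfl h
  | cons s rest ih =>
    intro x y _
    cases rest with
    | nil =>
      simp only [steper, List.foldl]
      simpa [PySem.List.pyGet?, PySem.List.pyIdx?] using moveA_eq_stepB [x, y] s lab
    | cons t rest' =>
      have hmv := moveA_eq_stepB [x, y] s lab
      simp only [PySem.List.pyGet?, PySem.List.pyIdx?] at hmv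
      have hA : steper lab [x, y] (s :: t :: rest') =
          steper lab (moveA [x, y] s lab) (t :: rest') := by
        simp [steper]
      rw [hA, hmv]
      have := ih ((stepB lab (x, y) s).1) ((stepB lab (x, y) s).2) (by simp)
      simpa [List.foldl] using this

-- ===== VERDICT (by name: the statement is the Claim_ definition above) =====
theorem steper_spec : Claim_equal_steper := by
  intro lab z_point way _ hpre
  have hway := hpre.1
  unfold Spec_steper steper_alt
  set x0 := (PySem.List.pyGet? z_point 0).getD 0 with hx0
  set y0 := (PySem.List.pyGet? z_point 1).getD 0 with hy0
  cases way with
  | nil => exact absurd rfl hway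
  | cons s rest =>
    cases rest with
    | nil =>
      simpa [steper, List.foldl] using moveA_eq_stepB z_point s lab
    | cons t rest' =>
      have hA : steper lab z_point (s :: t :: rest') =
          steper lab (moveA z_point s lab) (t :: rest') := by
        simp [steper]
      rw [hA, moveA_eq_stepB z_point s lab]
      simpa [List.foldl] using
        steper_pair lab (t :: rest') ((stepB lab (x0, y0) s).1) ((stepB lab (x0, y0) s).2) (by simp)
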